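-- pv_equiv track=rewrite | github.com/makp/nlp_trove | preprocessing/process_xml.py | _group_ids_by_length
-- ===== SOURCE A (Python) =====
-- def _group_ids_by_length(mapping: dict) -> dict:
--     output = {}
--     for id, elements in mapping.items():
--         key = len(elements)
--         if key not in output:
--             output[key] = list()
--         output[key].append(id)
--     return dict(sorted(output.items()))
-- ===== SOURCE B (Python) =====
-- def _group_ids_by_length(mapping: dict) -> dict:
--     lengths = sorted({len(v) for v in mapping.values()})
--     return {k: [i for i, v in mapping.items() if len(v) == k] for k in lengths}
-- ===== Notes on version B (the rewrite author's own statement) =====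
-- stated objective: idiomatic
-- what changed: B replaces A's incremental group-building dict loop with a two-line comprehension: sort the distinct element-counts once, then build each group's id list by filtering the mapping, instead of appending into a hash of growing lists and sorting its items afterwards.
import Mathlib
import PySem

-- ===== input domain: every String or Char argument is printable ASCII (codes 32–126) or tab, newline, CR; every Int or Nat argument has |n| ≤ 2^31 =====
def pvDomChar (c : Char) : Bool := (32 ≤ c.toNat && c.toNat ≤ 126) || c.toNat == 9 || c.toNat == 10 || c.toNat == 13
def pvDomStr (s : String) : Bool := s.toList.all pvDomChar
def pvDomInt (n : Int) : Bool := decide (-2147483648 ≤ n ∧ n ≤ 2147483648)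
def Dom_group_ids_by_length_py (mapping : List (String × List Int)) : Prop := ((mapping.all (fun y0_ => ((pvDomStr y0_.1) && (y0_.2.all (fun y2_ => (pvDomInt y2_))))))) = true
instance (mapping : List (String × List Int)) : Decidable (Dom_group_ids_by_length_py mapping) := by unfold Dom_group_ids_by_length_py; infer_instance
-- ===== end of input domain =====

-- B groups ids by element-count with a sorted-distinct-lengths comprehension instead of A's
-- incremental dict-of-lists loop; objective: idiomatic/simpler (not faster).

-- ===== PORT A =====
-- A: build output[len(elements)].append(id) over the items, then dict(sorted(output.items())).
-- 'sorted(output.items())' compares (key, value) tuples; the keys are distinct, so it is the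
-- sort by the integer key (tie-breaking on values is never reached).
def group_ids_by_length_py (mapping : List (String × List Int)) : List (Int × List String) :=
  let output : PySem.Dict Int (List String) :=
    mapping.foldl (fun output p =>
      let key : Int := p.2.length
      let output := if output.contains key then output else output.insert key []
      output.modify key [] (fun v => v ++ [p.1])) PySem.Dict.empty
  (PySem.Dict.ofList (PySem.List.sorted output.items (fun q => q.1))).items

-- ===== PORT B =====
def group_ids_by_length_py_alt (mapping : List (String × List Int)) : List (Int × List String) :=
  let lengths : List Int :=
    PySem.List.sorted (PySem.Set.ofList (mapping.map (fun p => (p.2.length : Int)))) (fun k => k)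
  lengths.map (fun k =>
    (k, (mapping.filter (fun p => ((p.2.length : Int)) == k)).map (fun p => p.1)))

-- ===== PRECONDITION & SPEC =====
def Spec_group_ids_by_length_py (mapping : List (String × List Int)) (out : List (Int × List String)) : Prop := out = group_ids_by_length_py_alt mapping
instance (mapping : List (String × List Int)) (out : List (Int × List String)) : Decidable (Spec_group_ids_by_length_py mapping out) := by unfold Spec_group_ids_by_length_py; infer_instance

-- ===== CLAIM (what is proved, stated in full; the proofs are below) =====
def Claim_equal_group_ids_by_length_py : Prop := ∀ (mapping : List (String × List Int)), Dom_group_ids_by_length_py mapping → Spec_group_ids_by_length_py mapping (group_ids_by_length_py mapping)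

-- ===== LEMMAS AND PROOFS =====

-- A's "if key not in output: output[key] = []" followed by the append is one dict.modify.
lemma ensure_then_modify {κ ν : Type} [BEq κ] [LawfulBEq κ]
    (d : PySem.Dict κ ν) (k : κ) (d0 : ν) (f : ν → ν) :
    (if d.contains k then d else d.insert k d0).modify k d0 f = d.modify k d0 f := by
  by_cases h : d.contains k = true
  · simp [h]
  · simp only [h, Bool.false_eq_true, if_false]
    simp only [PySem.Dict.modify]
    rw [PySem.Dict.getD_insert_self, PySem.Dict.insert_insert_self,
        PySem.Dict.getD_of_not_contains d d0 (by simpa using h)]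

theorem group_ids_by_length_py_spec' (mapping : List (String × List Int)) :
    group_ids_by_length_py mapping = group_ids_by_length_py_alt mapping := by
  unfold group_ids_by_length_py group_ids_by_length_py_alt
  set lens : List Int := mapping.map (fun p => (p.2.length : Int)) with hlens
  set S : List Int := PySem.Set.ofList lens with hS
  set g : Int → List String := fun k =>
    (mapping.filter (fun p => ((p.2.length : Int)) == k)).map (fun p => p.1) with hg
  -- rewrite A's loop to the plain modify loop over (length, id) pairs
  have hloop :
      mapping.foldl (fun output p =>
        let key : Int := p.2.length
        let output := if output.contains key then output else output.insert key []
        output.modify key [] (fun v => v ++ [p.1])) PySem.Dict.empty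
      = (mapping.map (fun p => ((p.2.length : Int), p.1))).foldl
          (fun d q => d.modify q.1 [] (fun v => v ++ [q.2])) PySem.Dict.empty := by
    rw [List.foldl_map]
    exact PySem.List.foldl_congr_mem mapping _ _ _
      (fun acc x _ => ensure_then_modify acc ((x.2.length : Int)) [] (fun v => v ++ [x.1]))
  rw [hloop]
  set out := (mapping.map (fun p => ((p.2.length : Int), p.1))).foldl
      (fun d q => d.modify q.1 [] (fun v => v ++ [q.2])) PySem.Dict.empty with hout
  -- keys of the built dict = distinct lengths in first-occurrence order
  have hkeys : out.keys = S := by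
    rw [hout, PySem.Dict.keys_foldl_modify_key
          (l := mapping.map (fun p => ((p.2.length : Int), p.1)))
          (key := fun q => q.1) (d0 := []) (f := fun _ q v => v ++ [q.2])]
    simp only [PySem.Dict.keys_empty, List.map_map, hS, hlens]
    rfl
  have hnd : out.keys.Nodup := by rw [hkeys]; exact PySem.Set.nodup_ofList lens
  -- each value is the filter of the mapping by that length
  have hval : ∀ k : Int, out.getD k [] = g k := by
    intro k
    rw [hout, PySem.Dict.getD_foldl_modify_append, PySem.Dict.getD_empty, List.nil_append,
        List.filter_map, List.map_map, hg]
    rfl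
  -- the dict's items, listed as (key, group) over the distinct keys
  have hitems : out.items = S.map (fun k => (k, g k)) := by
    rw [PySem.Dict.items_eq_map_keys out hnd [], hkeys]
    exact List.map_congr_left (fun k _ => by rw [hval k])
  show (PySem.Dict.ofList (PySem.List.sorted out.items (fun q => q.1))).items
      = (PySem.List.sorted S (fun k => k)).map (fun k => (k, g k))
  rw [hitems]
  -- sorting the items by their key = mapping the sorted keys
  have hSnd : S.Nodup := PySem.Set.nodup_ofList lens
  have hsortnd : (PySem.List.sorted S (fun k => k)).Nodup :=
    (PySem.List.sorted_perm S (fun k => k) false).nodup_iff.mpr hSnd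
  have hlt : List.Pairwise (fun a b : Int => a < b) (PySem.List.sorted S (fun k => k)) := by
    have hle := PySem.List.sorted_pairwise (xs := S) (key := fun k => k)
    exact ((hle.and hsortnd).imp (fun h => lt_of_le_of_ne h.1 h.2))
  have hsort : PySem.List.sorted (S.map (fun k => (k, g k))) (fun q => q.1)
      = (PySem.List.sorted S (fun k => k)).map (fun k => (k, g k)) := by
    apply PySem.List.sorted_eq_of_perm_of_pairwise_lt
    · exact (PySem.List.sorted_perm S (fun k => k) false).map _
    · exact (List.pairwise_map).mpr hlt
  rw [hsort]
  -- dict() of a key-distinct pair list keeps exactly that list as its items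
  have hfresh : (PySem.Dict.ofList ((PySem.List.sorted S (fun k => k)).map (fun k => (k, g k)))).items
      = (PySem.List.sorted S (fun k => k)).map (fun k => (k, g k)) := by
    show (((PySem.List.sorted S (fun k => k)).map (fun k => (k, g k))).foldl
        (fun d q => d.insert q.1 q.2) PySem.Dict.empty).items = _
    rw [List.foldl_map]
    rw [PySem.Dict.items_foldl_insert_fresh (l := PySem.List.sorted S (fun k => k))
        (k := fun k => k) (v := fun k => g k) (d := PySem.Dict.empty)
        (by intro a _; exact PySem.Dict.contains_empty a)
        (by simpa using hsortnd)]
    show PySem.Dict.empty.items ++ _ = _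
    rw [show (PySem.Dict.empty : PySem.Dict Int (List String)).items = [] from rfl, List.nil_append]
  rw [hfresh]

-- ===== VERDICT (by name: the statement is the Claim_ definition above) =====
theorem group_ids_by_length_py_spec : Claim_equal_group_ids_by_length_py := by
  intro mapping _
  exact group_ids_by_length_py_spec' mapping
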